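-- pv_equiv track=rewrite | github.com/GREAT-WHU/GREAT_PLOT | GREAT-PLOT/Python_plot/data_processing.py | convergence
-- ===== SOURCE A (Python) =====
-- def convergence(series: list, lim, epochs):
--     """
--     input a series and calculate the convergence based on the designated lim and num
--     :param series:
--     :param lim: threshold to judge convergence
--     :param num: consecutive epochs
--     :return: index
--     """
--     for i in range(len(series) - epochs + 1):
--         sub_list = []
--         for ele in series[i: i + epochs]:
--             sub_list.append(abs(ele))
--         if max(sub_list) < lim:
--             return i
--     return len(series) - 1
-- ===== SOURCE B (Python) =====
-- def convergence(series: list, lim, epochs):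
--     n = len(series)
--     bad = [-1] + [j for j, e in enumerate(series) if abs(e) >= lim] + [n]
--     for p, q in zip(bad, bad[1:]):
--         if q - p - 1 >= epochs:
--             return p + 1
--     return n - 1
-- ===== Notes on version B (the rewrite author's own statement) =====
-- stated objective: faster
-- what changed: Instead of scanning every window and taking its max (rebuilding an abs-list per start index), B builds the list of violation indices once and scans the gaps between consecutive violations, returning the start of the first gap of width >= epochs.
-- outside the precondition, e.g. on convergence([10, 1, 0], 2, -2): A returns 1, B returns 0; on convergence([5], 1, 0): A raises ValueError, B returns 0
import Mathlib
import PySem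

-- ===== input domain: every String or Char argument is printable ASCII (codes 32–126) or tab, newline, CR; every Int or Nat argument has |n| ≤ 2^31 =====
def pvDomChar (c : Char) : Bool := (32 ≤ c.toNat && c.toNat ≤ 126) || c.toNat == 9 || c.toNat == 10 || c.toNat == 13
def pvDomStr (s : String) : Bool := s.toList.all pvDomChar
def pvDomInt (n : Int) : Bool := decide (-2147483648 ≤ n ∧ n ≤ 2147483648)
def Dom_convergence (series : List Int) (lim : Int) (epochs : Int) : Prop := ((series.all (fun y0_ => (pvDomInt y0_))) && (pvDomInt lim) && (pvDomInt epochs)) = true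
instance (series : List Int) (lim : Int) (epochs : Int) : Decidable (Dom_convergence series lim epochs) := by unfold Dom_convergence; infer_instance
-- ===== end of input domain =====

-- B replaces A's per-window max scans by a single violation-index table plus one gap scan (faster).

-- ===== PORT A =====
-- the 'for i in range(...)' loop with early return; 'none' branch is Python's ValueError on an
-- empty window (max([])), reachable only for epochs ≤ 0, which Pre_ excludes.
def convLoopA (series : List Int) (lim : Int) (epochs : Int) : List Int → Int
  | [] => (series.length : Int) - 1
  | i :: rest =>
    let subList := (PySem.List.slice series (some i) (some (i + epochs))).map (fun e => |e|)
    match PySem.List.max? subList (fun y => y) with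
    | some m => if m < lim then i else convLoopA series lim epochs rest
    | none => 0

def convergence (series : List Int) (lim : Int) (epochs : Int) : Int :=
  convLoopA series lim epochs (PySem.List.pyRange 0 ((series.length : Int) - epochs + 1) 1)

-- ===== PORT B =====
-- the 'for p, q in zip(bad, bad[1:])' pair scan
def goB (n : Int) (epochs : Int) : Int → List Int → Int
  | _, [] => n - 1
  | p, q :: rest => if q - p - 1 ≥ epochs then p + 1 else goB n epochs q rest

def convergence_alt (series : List Int) (lim : Int) (epochs : Int) : Int :=
  let n : Int := (series.length : Int)
  let badIdx : List Int :=
    ((PySem.List.enumerate series 0).filter (fun je => |je.2| ≥ lim)).map (fun je => je.1)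
  goB n epochs (-1) (badIdx ++ [n])

-- ===== PRECONDITION & SPEC =====
-- Pre_ excludes epochs ≤ 0: there A's empty-window max([]) raises ValueError on most inputs, and
-- where a negative epochs slice wraps around it returns an accidental value of the wraparound.
def Pre_convergence (series : List Int) (lim : Int) (epochs : Int) : Prop := 1 ≤ epochs
instance (series : List Int) (lim : Int) (epochs : Int) : Decidable (Pre_convergence series lim epochs) := by unfold Pre_convergence; infer_instance
def pvWitness_convergence : List Int × Int × Int := ([0, 2, 0, 0], 1, 2)

def Spec_convergence (series : List Int) (lim : Int) (epochs : Int) (out : Int) : Prop := out = convergence_alt series lim epochs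
instance (series : List Int) (lim : Int) (epochs : Int) (out : Int) : Decidable (Spec_convergence series lim epochs out) := by unfold Spec_convergence; infer_instance

-- ===== CLAIM (what is proved, stated in full; the proofs are below) =====
def Claim_equal_convergence : Prop := ∀ (series : List Int) (lim : Int) (epochs : Int), Dom_convergence series lim epochs → Pre_convergence series lim epochs → Spec_convergence series lim epochs (convergence series lim epochs)

-- ===== LEMMAS AND PROOFS =====

-- proof-side vocabulary
def Good (series : List Int) (lim : Int) (j : Nat) : Prop := |series.getD j 0| < lim
def Qual (series : List Int) (lim : Int) (eN : Nat) (i : Nat) : Prop :=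
  i + eN ≤ series.length ∧ ∀ j : Nat, i ≤ j → j < i + eN → Good series lim j
def IsAns (series : List Int) (lim : Int) (eN : Nat) (r : Int) : Prop :=
  (∃ i : Nat, r = (i : Int) ∧ Qual series lim eN i ∧ ∀ i' : Nat, i' < i → ¬ Qual series lim eN i')
  ∨ ((∀ i : Nat, ¬ Qual series lim eN i) ∧ r = (series.length : Int) - 1)

theorem isAns_unique {series : List Int} {lim : Int} {eN : Nat} {r r' : Int}
    (h : IsAns series lim eN r) (h' : IsAns series lim eN r') : r = r' := by
  rcases h with ⟨i, rfl, hq, hmin⟩ | ⟨hno, rfl⟩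
  · rcases h' with ⟨i', rfl, hq', hmin'⟩ | ⟨hno', rfl⟩
    · rcases Nat.lt_trichotomy i i' with hlt | heq | hgt
      · exact absurd hq (hmin' _ hlt)
      · simp [heq]
      · exact absurd hq' (hmin _ hgt)
    · exact absurd hq (hno' i)
  · rcases h' with ⟨i', rfl, hq', _⟩ | ⟨_, rfl⟩
    · exact absurd hq' (hno i')
    · rfl

theorem max_lt_iff_all {sub : List Int} {m lim : Int}
    (h : PySem.List.max? sub (fun y => y) = some m) :
    (m < lim ↔ ∀ x ∈ sub, x < lim) := by
  constructor
  · intro hm x hx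
    exact lt_of_le_of_lt (PySem.List.max?_isMax h x hx) hm
  · intro hall
    exact hall m (PySem.List.max?_mem h)

theorem window_mem_iff {series : List Int} (a eN : Nat) (x : Int)
    (h : a + eN ≤ series.length) :
    (x ∈ (series.drop a).take eN ↔ ∃ j : Nat, a ≤ j ∧ j < a + eN ∧ series.getD j 0 = x) := by
  constructor
  · intro hx
    rcases List.mem_iff_getElem.mp hx with ⟨k, hk, hget⟩
    have hlen : ((series.drop a).take eN).length = eN := by
      simp [List.length_take, List.length_drop]; omega
    rw [hlen] at hk
    refine ⟨a + k, by omega, by omega, ?_⟩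
    have hlt : a + k < series.length := by omega
    rw [List.getD_eq_getElem _ _ hlt]
    rw [List.getElem_take, List.getElem_drop] at hget
    exact hget
  · rintro ⟨j, hj1, hj2, hget⟩
    have hlt : j < series.length := by omega
    rw [List.getD_eq_getElem _ _ hlt] at hget
    apply List.mem_iff_getElem.mpr
    have hlen : ((series.drop a).take eN).length = eN := by
      simp [List.length_take, List.length_drop]; omega
    refine ⟨j - a, by omega, ?_⟩
    rw [List.getElem_take, List.getElem_drop]
    simp only [← hget]
    congr 1
    omega

theorem window_all_iff {series : List Int} {lim : Int} (a eN : Nat)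
    (h : a + eN ≤ series.length) :
    ((∀ x ∈ ((series.drop a).take eN).map (fun z => |z|), x < lim) ↔
      ∀ j : Nat, a ≤ j → j < a + eN → Good series lim j) := by
  constructor
  · intro hall j hj1 hj2
    have hmem : series.getD j 0 ∈ (series.drop a).take eN :=
      (window_mem_iff a eN _ h).mpr ⟨j, hj1, hj2, rfl⟩
    exact hall _ (List.mem_map.mpr ⟨_, hmem, rfl⟩)
  · intro hgood x hx
    rcases List.mem_map.mp hx with ⟨z, hz, rfl⟩
    rcases (window_mem_iff a eN z h).mp hz with ⟨j, hj1, hj2, hget⟩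
    have hg := hgood j hj1 hj2
    unfold Good at hg
    rw [hget] at hg
    exact hg

theorem loopA_isAns (series : List Int) (lim : Int) (e : Int) (eN : Nat)
    (he : e = (eN : Int)) (h1 : 1 ≤ eN) :
    ∀ (k : Nat) (a : Nat), (((series.length : Int) - e + 1) - (a : Int)).toNat ≤ k →
      (∀ i : Nat, i < a → ¬ Qual series lim eN i) →
      IsAns series lim eN
        (convLoopA series lim e (PySem.List.pyRange (a : Int) ((series.length : Int) - e + 1) 1)) := by
  subst he
  intro k
  induction k with
  | zero =>
    intro a hk hmin
    rw [PySem.List.pyRange_one_eq_nil (by omega)]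
    refine Or.inr ⟨?_, rfl⟩
    intro i hq
    have hle := hq.1
    exact hmin i (by omega) hq
  | succ k ih =>
    intro a hk hmin
    by_cases hab : ((series.length : Int) - (eN : Int) + 1) ≤ (a : Int)
    · rw [PySem.List.pyRange_one_eq_nil hab]
      refine Or.inr ⟨?_, rfl⟩
      intro i hq
      have hle := hq.1
      exact hmin i (by omega) hq
    · push_neg at hab
      have haeN : a + eN ≤ series.length := by omega
      rw [PySem.List.pyRange_one_cons hab]
      simp only [convLoopA, PySem.List.slice_natCast_add]
      have hwne : ((series.drop a).take eN).map (fun z => |z|) ≠ [] := by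
        simp [List.length_take, List.length_drop]
        omega
      cases hmx : PySem.List.max? (((series.drop a).take eN).map (fun z => |z|)) (fun y => y) with
      | none => exact absurd ((PySem.List.max?_eq_none_iff _ _).mp hmx) hwne
      | some m =>
        by_cases hm : m < lim
        · simp only [if_pos hm]
          refine Or.inl ⟨a, rfl, ⟨haeN, ?_⟩, hmin⟩
          exact (window_all_iff a eN haeN).mp ((max_lt_iff_all hmx).mp hm)
        · simp only [if_neg hm]
          have hnq : ¬ Qual series lim eN a := by
            intro hq
            exact hm ((max_lt_iff_all hmx).mpr ((window_all_iff a eN haeN).mpr hq.2))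
          have hrec := ih (a + 1) (by omega) (by
            intro i hi
            rcases Nat.lt_or_ge i a with hlt | hge
            · exact hmin i hlt
            · have heq : i = a := by omega
              subst heq; exact hnq)
          simpa using hrec

theorem goB_isAns (series : List Int) (lim : Int) (e : Int) (eN : Nat)
    (he : e = (eN : Int)) (h1 : 1 ≤ eN) :
    ∀ (l : List Int) (p : Int), -1 ≤ p →
      (∀ x ∈ l, p < x ∧ x ≤ (series.length : Int)) →
      List.Pairwise (· < ·) l →
      l.getLast? = some (series.length : Int) →
      (∀ j : Nat, p < (j : Int) → (j : Int) < (series.length : Int) → ((j : Int) ∈ l ↔ ¬ Good series lim j)) →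
      (∀ i : Nat, (i : Int) ≤ p → ¬ Qual series lim eN i) →
      IsAns series lim eN (goB (series.length : Int) e p l) := by
  subst he
  intro l
  induction l with
  | nil => intro p _ _ _ hlast _ _; simp at hlast
  | cons q rest ih =>
    intro p hp hb hpw hlast hmemb hmin
    have hq_b := hb q (List.mem_cons_self ..)
    have hrest_gt : ∀ x ∈ rest, q < x := (List.pairwise_cons.mp hpw).1
    simp only [goB]
    split_ifs with hgap
    · -- found the first sufficient gap: answer p + 1
      refine Or.inl ⟨(p + 1).toNat, by omega, ⟨by omega, ?_⟩, ?_⟩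
      · intro j hj1 hj2
        have hjp : p < (j : Int) := by omega
        have hjq : (j : Int) < q := by omega
        have hjn : (j : Int) < (series.length : Int) := by omega
        have hnotin : (j : Int) ∉ q :: rest := by
          intro hmem
          rcases List.mem_cons.mp hmem with hcase | hcase
          · omega
          · have := hrest_gt _ hcase; omega
        exact not_not.mp ((hmemb j hjp hjn).not.mp hnotin)
      · intro iq hiq
        exact hmin iq (by omega)
    · -- gap too small: the head interval contains no answer
      have hnq_between : ∀ i : Nat, (i : Int) ≤ q → ¬ Qual series lim eN i := by
        intro i hiq hq2
        by_cases hip : (i : Int) ≤ p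
        · exact hmin i hip hq2
        · rcases hq2 with ⟨hlen, hall⟩
          cases rest with
          | nil =>
            have hq_n : q = (series.length : Int) := by simpa using hlast
            omega
          | cons q2 rest2 =>
            have hq2le := hb q2 (by simp)
            have hq_lt_n : q < (series.length : Int) := by
              have := hrest_gt q2 (by simp); omega
            have hqN : ((q.toNat : Int)) = q := Int.toNat_of_nonneg (by omega)
            have hbadq : ¬ Good series lim q.toNat := by
              refine (hmemb q.toNat (by omega) (by omega)).mp ?_
              rw [hqN]; exact List.mem_cons_self ..
            exact hbadq (hall q.toNat (by omega) (by omega))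
      cases rest with
      | nil =>
        have hq_n : q = (series.length : Int) := by simpa using hlast
        refine Or.inr ⟨?_, rfl⟩
        intro i hq2
        have := hq2.1
        exact hnq_between i (by omega) hq2
      | cons q2 rest2 =>
        refine ih q (by omega) ?_ (List.Pairwise.of_cons hpw) ?_ ?_ hnq_between
        · intro x hx
          exact ⟨hrest_gt x hx, (hb x (List.mem_cons_of_mem _ hx)).2⟩
        · rw [← hlast]; rfl
        · intro j hjq hjn
          constructor
          · intro hmem
            exact (hmemb j (by omega) hjn).mp (List.mem_cons_of_mem _ hmem)
          · intro hbad
            rcases List.mem_cons.mp ((hmemb j (by omega) hjn).mpr hbad) with hcase | hcase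
            · omega
            · exact hcase

theorem A_isAns (series : List Int) (lim : Int) (e : Int) (eN : Nat)
    (he : e = (eN : Int)) (h1 : 1 ≤ eN) :
    IsAns series lim eN (convergence series lim e) := by
  have := loopA_isAns series lim e eN he h1
    (((series.length : Int) - e + 1).toNat) 0 (by simp) (by omega)
  simpa [convergence] using this

theorem bad_mem_iff (series : List Int) (lim : Int) (x : Int) :
    (x ∈ ((PySem.List.enumerate series 0).filter (fun je => |je.2| ≥ lim)).map (fun je => je.1) ↔
      ∃ j : Nat, x = (j : Int) ∧ j < series.length ∧ ¬ Good series lim j) := by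
  constructor
  · intro hx
    rcases List.mem_map.mp hx with ⟨pr, hpf, rfl⟩
    rcases List.mem_filter.mp hpf with ⟨hpe, hpred⟩
    rcases ((PySem.List.mem_enumerate_iff _ _ _).mp hpe) with ⟨k, hk, rfl⟩
    refine ⟨k, by simp, hk, ?_⟩
    unfold Good
    rw [List.getD_eq_getElem _ _ hk]
    simp at hpred ⊢
    omega
  · rintro ⟨j, rfl, hj, hbad⟩
    unfold Good at hbad
    rw [List.getD_eq_getElem _ _ hj] at hbad
    refine List.mem_map.mpr ⟨((j : Int), series[j]), ?_, by simp⟩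
    refine List.mem_filter.mpr ⟨(PySem.List.mem_enumerate_iff _ _ _).mpr ⟨j, hj, by simp⟩, ?_⟩
    simp
    omega

theorem bad_pairwise (series : List Int) (lim : Int) :
    (((PySem.List.enumerate series 0).filter (fun je => |je.2| ≥ lim)).map (fun je => je.1)).Pairwise (· < ·) := by
  apply List.pairwise_map.mpr
  exact List.Pairwise.filter _ (PySem.List.pairwise_lt_enumerate series 0)

theorem B_isAns (series : List Int) (lim : Int) (e : Int) (eN : Nat)
    (he : e = (eN : Int)) (h1 : 1 ≤ eN) :
    IsAns series lim eN (convergence_alt series lim e) := by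
  have hbm := bad_mem_iff series lim
  have hbp := bad_pairwise series lim
  show IsAns series lim eN (goB _ _ _ _)
  apply goB_isAns series lim e eN he h1 _ (-1) le_rfl
  · intro x hx
    rcases List.mem_append.mp hx with hcase | hcase
    · rcases (hbm x).mp hcase with ⟨j, rfl, hj, _⟩
      constructor <;> omega
    · simp at hcase
      subst hcase
      constructor <;> omega
  · rw [List.pairwise_append]
    refine ⟨hbp, List.pairwise_singleton _ _, ?_⟩
    intro x hx y hy
    simp at hy
    subst hy
    rcases (hbm x).mp hx with ⟨j, rfl, hj, _⟩
    omega
  · exact List.getLast?_concat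
  · intro j hjm hjn
    constructor
    · intro hmem
      rcases List.mem_append.mp hmem with hcase | hcase
      · rcases (hbm _).mp hcase with ⟨j2, hjj, _, hbad⟩
        have hje : j = j2 := by omega
        subst hje; exact hbad
      · simp at hcase; omega
    · intro hbad
      exact List.mem_append.mpr (Or.inl ((hbm _).mpr ⟨j, rfl, by omega, hbad⟩))
  · intro i hi
    omega

-- ===== VERDICT (by name: the statement is the Claim_ definition above) =====
theorem convergence_spec : Claim_equal_convergence := by
  intro series lim epochs _hdom hpre
  have h1 : (1 : Int) ≤ epochs := hpre
  have he : epochs = (epochs.toNat : Int) := by omega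
  have h1N : 1 ≤ epochs.toNat := by omega
  exact isAns_unique (A_isAns series lim epochs epochs.toNat he h1N)
    (B_isAns series lim epochs epochs.toNat he h1N)
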